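-- pv_equiv track=rewrite | github.com/deepak16686/myfirstrepository | dev-stack/backend/app/services/rbac_service.py | _best_group
-- ===== SOURCE A (Python) =====
-- from typing import Dict, List, Optional, Any
--
-- def _best_group(groups: List[str]) -> str:
--     """Return the highest access level from a list of groups."""
--     priority = {"devops-admin": 3, "devops-readwrite": 2, "devops-readonly": 1}
--     best = "none"
--     best_p = 0
--     for g in groups:
--         p = priority.get(g, 0)
--         if p > best_p:
--             best = g
--             best_p = p
--     return best
-- ===== SOURCE B (Python) =====
-- def _best_group(groups):
--     """Return the highest access level from a list of groups."""
--     if "devops-admin" in groups: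
--         return "devops-admin"
--     if "devops-readwrite" in groups:
--         return "devops-readwrite"
--     if "devops-readonly" in groups:
--         return "devops-readonly"
--     return "none"
-- ===== Notes on version B (the rewrite author's own statement) =====
-- stated objective: idiomatic
-- what changed: Replaces the single scan keeping a running best-priority accumulator with short-circuiting membership tests in descending priority order, removing the dict and all loop state.
import Mathlib
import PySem

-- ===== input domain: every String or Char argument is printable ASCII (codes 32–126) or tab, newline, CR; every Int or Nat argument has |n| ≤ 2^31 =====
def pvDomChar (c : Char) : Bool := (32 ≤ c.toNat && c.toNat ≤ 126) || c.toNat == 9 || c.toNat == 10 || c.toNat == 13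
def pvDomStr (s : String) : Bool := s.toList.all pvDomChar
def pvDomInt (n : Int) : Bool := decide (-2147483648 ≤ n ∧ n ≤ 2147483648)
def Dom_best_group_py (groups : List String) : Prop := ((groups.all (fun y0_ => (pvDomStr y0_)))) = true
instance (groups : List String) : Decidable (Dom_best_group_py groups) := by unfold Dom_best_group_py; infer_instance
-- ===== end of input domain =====

-- B replaces A's scan with a running best-priority accumulator by short-circuiting
-- membership tests in descending priority order (idiomatic; no loop state).


-- ===== PORT A =====
-- the literal dict 'priority'
def bg_priority : PySem.Dict String Int :=
  PySem.Dict.mk [("devops-admin", 3), ("devops-readwrite", 2), ("devops-readonly", 1)]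

-- the loop body: p = priority.get(g, 0); if p > best_p: best, best_p = g, p
def bg_step (st : String × Int) (g : String) : String × Int :=
  let p := PySem.Dict.getD bg_priority g 0
  if p > st.2 then (g, p) else st

def best_group_py (groups : List String) : String :=
  (groups.foldl bg_step ("none", 0)).1

-- ===== PORT B =====
def best_group_py_alt (groups : List String) : String :=
  if groups.contains "devops-admin" then "devops-admin"
  else if groups.contains "devops-readwrite" then "devops-readwrite"
  else if groups.contains "devops-readonly" then "devops-readonly"
  else "none"

-- ===== PRECONDITION & SPEC =====
def Spec_best_group_py (groups : List String) (out : String) : Prop := out = best_group_py_alt groups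
instance (groups : List String) (out : String) : Decidable (Spec_best_group_py groups out) := by unfold Spec_best_group_py; infer_instance

-- ===== CLAIM (what is proved, stated in full; the proofs are below) =====
def Claim_equal_best_group_py : Prop := ∀ (groups : List String), Dom_best_group_py groups → Spec_best_group_py groups (best_group_py groups)

-- ===== LEMMAS AND PROOFS =====

theorem bg_get (g : String) : PySem.Dict.getD bg_priority g 0 =
    if g = "devops-admin" then 3 else if g = "devops-readwrite" then 2
    else if g = "devops-readonly" then 1 else 0 := by
  by_cases h1 : g = "devops-admin" <;> by_cases h2 : g = "devops-readwrite" <;>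
    by_cases h3 : g = "devops-readonly" <;>
    [skip; skip; skip; skip; skip; skip; skip;
     · have e1 : (("devops-admin" : String) == g) = false := by simp [Ne.symm h1]
       have e2 : (("devops-readwrite" : String) == g) = false := by simp [Ne.symm h2]
       have e3 : (("devops-readonly" : String) == g) = false := by simp [Ne.symm h3]
       simp [bg_priority, PySem.Dict.getD, PySem.Dict.get?, List.find?, e1, e2, e3, h1, h2, h3]] <;>
    simp_all [bg_priority, PySem.Dict.getD, PySem.Dict.get?, List.find?]

-- Characterisation of A's fold from any state it can actually reach.
theorem bg_foldl_char (t : List String) (s : String) (p : Int)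
    (hp : p = 0 ∨ (s = "devops-readonly" ∧ p = 1) ∨ (s = "devops-readwrite" ∧ p = 2) ∨ (s = "devops-admin" ∧ p = 3)) :
    t.foldl bg_step (s, p) =
      if t.contains "devops-admin" ∧ p < 3 then ("devops-admin", 3)
      else if t.contains "devops-readwrite" ∧ p < 2 then ("devops-readwrite", 2)
      else if t.contains "devops-readonly" ∧ p < 1 then ("devops-readonly", 1)
      else (s, p) := by
  induction t generalizing s p with
  | nil => simp
  | cons g t ih =>
    have hstep : bg_step (s, p) g =
        if PySem.Dict.getD bg_priority g 0 > p then (g, PySem.Dict.getD bg_priority g 0)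
        else (s, p) := rfl
    rw [List.foldl_cons, hstep, bg_get g]
    by_cases h1 : g = "devops-admin"
    · subst h1
      rcases hp with h | ⟨hs, h⟩ | ⟨hs, h⟩ | ⟨hs, h⟩ <;> subst h <;> try subst hs
      all_goals simp only; norm_num
      all_goals rw [ih _ _ (by tauto)]; simp
    · by_cases h2 : g = "devops-readwrite"
      · subst h2
        have e1 : (("devops-admin" : String) = "devops-readwrite") = False := by simp
        rcases hp with h | ⟨hs, h⟩ | ⟨hs, h⟩ | ⟨hs, h⟩ <;> subst h <;> try subst hs
        all_goals simp only; norm_num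
        all_goals rw [ih _ _ (by tauto)]; simp
      · by_cases h3 : g = "devops-readonly"
        · subst h3
          have e1 : (("devops-readonly" : String) = "devops-admin") = False := by simp
          have e2 : (("devops-readonly" : String) = "devops-readwrite") = False := by simp
          rcases hp with h | ⟨hs, h⟩ | ⟨hs, h⟩ | ⟨hs, h⟩ <;> subst h <;> try subst hs
          all_goals simp only; norm_num
          all_goals rw [ih _ _ (by tauto)]; simp
        · have e1 : (("devops-admin" : String) == g) = false := by simp [Ne.symm h1]
          have e2 : (("devops-readwrite" : String) == g) = false := by simp [Ne.symm h2]
          have e3 : (("devops-readonly" : String) == g) = false := by simp [Ne.symm h3]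
          simp only [h1, h2, h3, if_false]
          have hlt : ¬ ((0 : Int) > p) := by rcases hp with h | ⟨_, h⟩ | ⟨_, h⟩ | ⟨_, h⟩ <;> omega
          rw [if_neg hlt, ih _ _ hp]
          simp [Ne.symm h1, Ne.symm h2, Ne.symm h3]

-- ===== VERDICT (by name: the statement is the Claim_ definition above) =====
theorem best_group_py_spec : Claim_equal_best_group_py := by
  intro groups _
  unfold Spec_best_group_py best_group_py best_group_py_alt
  rw [bg_foldl_char groups "none" 0 (Or.inl rfl)]
  split_ifs with h1 h2 h3 <;> simp_all
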